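-- pv_equiv track=rewrite | github.com/2545666/Smart-Aging-Acoustic-Perception-and-Optimized-Localization-System | uart_comm.py | _build_crc8_table
-- ===== SOURCE A (Python) =====
-- def _build_crc8_table(poly: int = 0x07):
--     """Pre-compute a 256-entry CRC-8 lookup table."""
--     table = []
--     for i in range(256):
--         crc = i
--         for _ in range(8):
--             if crc & 0x80:
--                 crc = ((crc << 1) ^ poly) & 0xFF
--             else:
--                 crc = (crc << 1) & 0xFF
--         table.append(crc)
--     return table
-- ===== SOURCE B (Python) =====
-- def _build_crc8_table(poly: int = 0x07):
--     """Pre-compute a 256-entry CRC-8 lookup table.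
--
--     CRC-8 is GF(2)-linear in the register, so only the 8 single-bit CRCs are
--     computed with the shift loop; every other entry is the XOR of the basis
--     values for its set bits.
--     """
--     p = poly & 0xFF
--     basis = []
--     for b in (1, 2, 4, 8, 16, 32, 64, 128):
--         crc = b
--         for _ in range(8):
--             crc = ((crc << 1) & 0xFF) ^ (p if crc & 0x80 else 0)
--         basis.append(crc)
--     table = []
--     for i in range(256):
--         acc = 0
--         bit = 1
--         for bv in basis:
--             if i & bit:
--                 acc ^= bv
--             bit <<= 1
--         table.append(acc)
--     return table
-- ===== Notes on version B (the rewrite author's own statement) =====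
-- stated objective: alternative
-- what changed: Instead of running the eight-step shift loop for every table entry, B runs it only for the eight single-bit register values and builds every other entry as the XOR of those basis values for its set bits (GF(2)-linearity of the CRC update).
import Mathlib
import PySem

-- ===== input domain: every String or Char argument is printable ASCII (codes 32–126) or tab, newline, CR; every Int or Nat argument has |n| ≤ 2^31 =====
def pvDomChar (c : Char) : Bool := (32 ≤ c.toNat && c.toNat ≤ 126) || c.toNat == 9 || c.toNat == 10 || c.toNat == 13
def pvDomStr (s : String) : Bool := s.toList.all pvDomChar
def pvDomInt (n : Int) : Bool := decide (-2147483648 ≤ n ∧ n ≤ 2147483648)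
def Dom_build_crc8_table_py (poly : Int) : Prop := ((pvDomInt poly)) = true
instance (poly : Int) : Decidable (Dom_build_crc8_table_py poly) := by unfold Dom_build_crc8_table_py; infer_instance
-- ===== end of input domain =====

set_option maxRecDepth 10000

-- B replaces the per-entry shift loop by the single-bit basis CRCs plus an XOR
-- accumulation per entry (GF(2)-linearity of the CRC register update); alternative algorithm.


-- ===== PORT A =====
def build_crc8_table_py (poly : Int) : List Int :=
  (PySem.List.pyRange 0 256 1).foldl (fun table i =>
    table ++ [(PySem.List.pyRange 0 8 1).foldl (fun crc _ =>
      if PySem.Int.band crc 128 ≠ 0 then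
        PySem.Int.band (PySem.Int.bxor (crc <<< (1:Nat)) poly) 255
      else
        PySem.Int.band (crc <<< (1:Nat)) 255) i]) []

-- ===== PORT B =====
def build_crc8_table_py_alt (poly : Int) : List Int :=
  let p := PySem.Int.band poly 255
  let basis := ([1, 2, 4, 8, 16, 32, 64, 128] : List Int).foldl (fun bs b =>
    bs ++ [(PySem.List.pyRange 0 8 1).foldl (fun crc _ =>
      PySem.Int.bxor (PySem.Int.band (crc <<< (1:Nat)) 255)
        (if PySem.Int.band crc 128 ≠ 0 then p else 0)) b]) []
  (PySem.List.pyRange 0 256 1).foldl (fun table i =>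
    table ++ [(basis.foldl (fun (s : Int × Int) bv =>
      ((if PySem.Int.band i s.2 ≠ 0 then PySem.Int.bxor s.1 bv else s.1), s.2 <<< (1:Nat)))
      ((0:Int), (1:Int))).1]) []

-- ===== PRECONDITION & SPEC =====
def Spec_build_crc8_table_py (poly : Int) (out : List Int) : Prop := out = build_crc8_table_py_alt poly
instance (poly : Int) (out : List Int) : Decidable (Spec_build_crc8_table_py poly out) := by unfold Spec_build_crc8_table_py; infer_instance

-- ===== CLAIM (what is proved, stated in full; the proofs are below) =====
def Claim_equal_build_crc8_table_py : Prop := ∀ (poly : Int), Dom_build_crc8_table_py poly → Spec_build_crc8_table_py poly (build_crc8_table_py poly)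

-- ===== LEMMAS AND PROOFS =====

-- Nat model of the 8-bit register update and its 8-fold iteration
def natStep (q c : Nat) : Nat :=
  if c &&& 128 ≠ 0 then ((c <<< 1) ^^^ q) &&& 255 else (c <<< 1) &&& 255

def natRun (q c : Nat) : Nat :=
  natStep q (natStep q (natStep q (natStep q (natStep q (natStep q (natStep q (natStep q c)))))))

-- the 8 low bits of the polynomial, as seen by Python's '& 0xFF'
def pvQ (p : Int) : Nat := (PySem.Int.band p 255).toNat

lemma sub255 : ∀ z < 256, 255 - z = 255 ^^^ z := by decide

lemma testBit_mask255 (y j : Nat) : ((y &&& 255).testBit j) = (decide (j < 8) && y.testBit j) := by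
  have h : (255 : Nat) = 2 ^ 8 - 1 := rfl
  rw [h, Nat.and_two_pow_sub_one_eq_mod, Nat.testBit_mod_two_pow]

lemma testBit_negmask (y j : Nat) : ((255 - (255 &&& y)).testBit j) = (decide (j < 8) && ! y.testBit j) := by
  have hle : 255 &&& y < 256 := by
    have := Nat.and_le_left (n := 255) (m := y); omega
  rw [sub255 _ hle, Nat.testBit_xor, Nat.testBit_and]
  have h : (255 : Nat) = 2 ^ 8 - 1 := rfl
  rw [h, Nat.testBit_two_pow_sub_one]
  cases hy : y.testBit j <;> cases h8 : (decide (j < 8)) <;> simp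

lemma mask_xor_poly (p : Int) (x : Nat) :
    PySem.Int.band (PySem.Int.bxor (↑x) p) 255 = ↑((x ^^^ pvQ p) &&& 255) := by
  rcases le_or_gt 0 p with hp | hp
  · obtain ⟨m, rfl⟩ := Int.eq_ofNat_of_zero_le hp
    have h255 : (255:Int) = ((255:Nat):Int) := rfl
    rw [PySem.Int.bxor_natCast, h255, PySem.Int.band_natCast]
    have hq : pvQ (↑m) = m &&& 255 := by
      unfold pvQ; rw [h255, PySem.Int.band_natCast]; simp
    rw [hq]
    congr 1
    apply Nat.eq_of_testBit_eq
    intro j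
    rw [testBit_mask255, testBit_mask255, Nat.testBit_xor, Nat.testBit_xor, testBit_mask255]
    cases h8 : decide (j < 8) <;> cases hx : x.testBit j <;> cases hm : m.testBit j <;> simp
  · obtain ⟨m, rfl⟩ : ∃ m : Nat, p = Int.negSucc m := by
      refine ⟨(-p - 1).toNat, ?_⟩
      omega
    have hbx : PySem.Int.bxor (↑x) (Int.negSucc m) = -(↑(x ^^^ m) : Int) - 1 := by
      have h1 : ¬ (0:Int) ≤ Int.negSucc m := by omega
      simp only [PySem.Int.bxor, Int.toNat_natCast, if_pos (Int.natCast_nonneg x), if_neg h1]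
      norm_num
    rw [hbx]
    have h2 : ¬ (0:Int) ≤ -(↑(x ^^^ m) : Int) - 1 := by omega
    have h3 : (0:Int) ≤ 255 := by norm_num
    simp only [PySem.Int.band, if_neg h2, if_pos h3]
    norm_num
    have ht : Int.toNat 255 = 255 := rfl
    rw [ht]
    have hq : pvQ (Int.negSucc m) = 255 - (255 &&& m) := by
      unfold pvQ
      have h5 : ¬ (0:Int) ≤ Int.negSucc m := by omega
      simp only [PySem.Int.band, if_neg h5, if_pos h3]
      norm_num
      rfl
    rw [hq]
    apply Nat.eq_of_testBit_eq
    intro j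
    rw [testBit_negmask, testBit_mask255, Nat.testBit_xor, Nat.testBit_xor, testBit_negmask]
    cases h8 : decide (j < 8) <;> cases hx : x.testBit j <;> cases hm : m.testBit j <;> simp


lemma band255_eq_cast (p : Int) : PySem.Int.band p 255 = ↑(pvQ p) := by
  have h : 0 ≤ PySem.Int.band p 255 := by
    rw [PySem.Int.band_comm]
    exact PySem.Int.band_nonneg_of_nonneg_left p (by norm_num)
  unfold pvQ
  omega

lemma pvQ_lt (p : Int) : pvQ p < 256 := by
  unfold pvQ
  rcases le_or_gt 0 p with hp | hp
  · have h3 : (0:Int) ≤ 255 := by norm_num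
    rw [PySem.Int.band_of_nonneg hp h3]
    have := Nat.and_le_right (n := p.toNat) (m := (255:Int).toNat)
    have ht : (255:Int).toNat = 255 := rfl
    omega
  · have h2 : ¬ (0:Int) ≤ p := by omega
    have h3 : (0:Int) ≤ 255 := by norm_num
    simp only [PySem.Int.band, if_neg h2, if_pos h3]
    have ht : (255:Int).toNat = 255 := rfl
    rw [ht]
    omega

-- the alternative masking order used by B's step
lemma mask_order (a q : Nat) (hq : q < 256) : ((a &&& 255) ^^^ q) = ((a ^^^ q) &&& 255) := by
  apply Nat.eq_of_testBit_eq
  intro j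
  rw [Nat.testBit_xor, testBit_mask255, testBit_mask255, Nat.testBit_xor]
  by_cases h8 : j < 8
  · simp [h8]
  · have hlt : q < 2 ^ j := by
      calc q < 256 := hq
      _ = 2 ^ 8 := rfl
      _ ≤ 2 ^ j := Nat.pow_le_pow_right (by norm_num) (by omega)
    rw [Nat.testBit_eq_false_of_lt hlt]
    simp [h8]

-- B's step, on a natCast state, is natStep
lemma step_bridge_B (p : Int) (x : Nat) :
    PySem.Int.bxor (PySem.Int.band (((↑x : Int)) <<< (1:Nat)) 255)
      (if PySem.Int.band (↑x) 128 ≠ 0 then PySem.Int.band p 255 else 0)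
    = ↑(natStep (pvQ p) x) := by
  have hsh : ((↑x : Int) <<< (1:Nat)) = ↑(x <<< 1) := by simp
  have h128 : (128:Int) = ((128:Nat):Int) := rfl
  have h255 : (255:Int) = ((255:Nat):Int) := rfl
  rw [band255_eq_cast p, hsh, h128, h255, PySem.Int.band_natCast, PySem.Int.band_natCast]
  unfold natStep
  by_cases h : x &&& 128 = 0
  · simp [h]
  · rw [if_pos (by simpa using h), if_pos (by simpa using h), PySem.Int.bxor_natCast,
        mask_order _ _ (pvQ_lt p)]

-- A's step, on a natCast state, is natStep
lemma step_bridge (p : Int) (x : Nat) :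
    (if PySem.Int.band (↑x) 128 ≠ 0 then
        PySem.Int.band (PySem.Int.bxor ((↑x : Int) <<< (1:Nat)) p) 255
      else
        PySem.Int.band ((↑x : Int) <<< (1:Nat)) 255)
    = ↑(natStep (pvQ p) x) := by
  have hsh : ((↑x : Int) <<< (1:Nat)) = ↑(x <<< 1) := by simp
  have h128 : (128:Int) = ((128:Nat):Int) := rfl
  have h255 : (255:Int) = ((255:Nat):Int) := rfl
  rw [hsh, h128, PySem.Int.band_natCast, mask_xor_poly, h255, PySem.Int.band_natCast]
  unfold natStep
  by_cases h : x &&& 128 = 0 <;> simp [h]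

lemma natStep_zero (q : Nat) : natStep q 0 = 0 := by
  unfold natStep; norm_num

lemma natRun_zero (q : Nat) : natRun q 0 = 0 := by
  unfold natRun; simp [natStep_zero]

lemma testBit7 (c : Nat) : (c &&& 128 ≠ 0) ↔ c.testBit 7 = true := by
  have h : (128:Nat) = 2 ^ 7 := rfl
  rw [h, Nat.and_two_pow]
  cases hc : c.testBit 7 <;> simp

-- GF(2)-linearity of the register update: the heart of B's correctness
lemma natStep_linear (q x y : Nat) :
    natStep q (x ^^^ y) = natStep q x ^^^ natStep q y := by
  unfold natStep
  have hcond : ((x ^^^ y) &&& 128 ≠ 0) ↔ ¬ ((x &&& 128 ≠ 0) ↔ (y &&& 128 ≠ 0)) := by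
    rw [testBit7, testBit7, testBit7, Nat.testBit_xor]
    cases hx : x.testBit 7 <;> cases hy : y.testBit 7 <;> simp
  split_ifs with h1 h2 h3 h4 h5 h6 h7 <;>
  first
    | (exfalso; rw [hcond] at h1; tauto)
    | (apply Nat.eq_of_testBit_eq; intro j;
       simp only [testBit_mask255, Nat.testBit_xor, Nat.testBit_shiftLeft];
       cases hj8 : decide (j < 8) <;> cases hj1 : decide (j ≥ 1) <;>
         cases hxb : x.testBit (j-1) <;> cases hyb : y.testBit (j-1) <;> cases hqb : q.testBit j <;>
         simp)

lemma natRun_linear (q x y : Nat) :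
    natRun q (x ^^^ y) = natRun q x ^^^ natRun q y := by
  unfold natRun; simp only [natStep_linear]

lemma mod_pow_succ_xor (i m : Nat) :
    i % 2 ^ (m + 1) = (i % 2 ^ m) ^^^ (if i.testBit m then 2 ^ m else 0) := by
  apply Nat.eq_of_testBit_eq
  intro j
  rw [Nat.testBit_mod_two_pow, Nat.testBit_xor, Nat.testBit_mod_two_pow]
  by_cases hb : i.testBit m
  · rw [if_pos hb, Nat.testBit_two_pow]
    rcases Nat.lt_trichotomy j m with h | h | h
    · simp [h, Nat.lt_succ_of_lt h, Nat.ne_of_gt h]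
    · subst h; simp [hb]
    · have h1 : ¬ j < m := by omega
      have h2 : ¬ j < m + 1 := by omega
      simp [h1, h2, Nat.ne_of_lt h]
  · rw [if_neg hb]
    simp only [Nat.zero_testBit, Bool.xor_false]
    rcases Nat.lt_trichotomy j m with h | h | h
    · simp [h, Nat.lt_succ_of_lt h]
    · subst h
      simp [hb]
    · have h1 : ¬ j < m := by omega
      have h2 : ¬ j < m + 1 := by omega
      simp [h1, h2]

-- XOR of single-bit CRCs over the first m bits reconstructs the CRC of i % 2^m
lemma fold_bits (q i : Nat) : ∀ m : Nat,
    (List.range m).foldl (fun acc k => if i.testBit k then acc ^^^ natRun q (2 ^ k) else acc) 0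
      = natRun q (i % 2 ^ m) := by
  intro m
  induction m with
  | zero => rw [Nat.pow_zero, Nat.mod_one, natRun_zero]; rfl
  | succ m ih =>
    rw [List.range_succ, List.foldl_append, ih, List.foldl_cons, List.foldl_nil,
        mod_pow_succ_xor, natRun_linear]
    by_cases hb : i.testBit m
    · simp [hb]
    · simp [hb, natRun_zero]

lemma foldl_app {α β : Type} (f : α → β) : ∀ (xs : List α) (acc : List β),
    xs.foldl (fun t i => t ++ [f i]) acc = acc ++ xs.map f := by
  intro xs
  induction xs with
  | nil => intro acc; simp
  | cons x xs ih => intro acc; simp [ih]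

lemma pyRange8 : PySem.List.pyRange 0 8 1 = [0, 1, 2, 3, 4, 5, 6, 7] := by decide

-- the shared inner 8-step loop, on a natCast start, is natRun
lemma inner_bridge (p : Int) (n : Nat) :
    (PySem.List.pyRange 0 8 1).foldl (fun crc _ =>
      if PySem.Int.band crc 128 ≠ 0 then
        PySem.Int.band (PySem.Int.bxor (crc <<< (1:Nat)) p) 255
      else
        PySem.Int.band (crc <<< (1:Nat)) 255) (↑n)
    = ↑(natRun (pvQ p) n) := by
  rw [pyRange8]
  simp only [List.foldl_cons, List.foldl_nil, step_bridge]
  rfl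

-- B's inner 8-step loop, on a natCast start, is natRun
lemma inner_bridge_B (p : Int) (n : Nat) :
    (PySem.List.pyRange 0 8 1).foldl (fun crc _ =>
      PySem.Int.bxor (PySem.Int.band (crc <<< (1:Nat)) 255)
        (if PySem.Int.band crc 128 ≠ 0 then PySem.Int.band p 255 else 0)) (↑n)
    = ↑(natRun (pvQ p) n) := by
  rw [pyRange8]
  simp only [List.foldl_cons, List.foldl_nil, step_bridge_B]
  rfl

lemma A_char (p : Int) :
    build_crc8_table_py p = (List.range 256).map (fun n => ↑(natRun (pvQ p) n)) := by
  unfold build_crc8_table_py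
  simp only [pyRange8]
  rw [PySem.List.pyRange_one, foldl_app]
  simp only [List.nil_append, List.map_map]
  have h256 : ((256:Int) - 0).toNat = 256 := rfl
  rw [h256]
  apply List.map_congr_left
  intro n _
  simp only [Function.comp_apply, zero_add]
  have h := inner_bridge p n
  rw [pyRange8] at h
  simp only [List.foldl_cons, List.foldl_nil] at h ⊢
  exact h

lemma pow_shift (j : Nat) : (((2 ^ j : Nat) : Int) <<< (1:Nat)) = ((2 ^ (j+1) : Nat) : Int) := by
  have h : (((2^j : Nat) : Int) <<< (1:Nat)) = (((2^j) <<< 1 : Nat) : Int) := by simp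
  rw [h]
  congr 1
  rw [Nat.shiftLeft_eq, Nat.pow_succ]
  ring

lemma cond_bridge (n j : Nat) : (PySem.Int.band (↑n) ((2^j : Nat) : Int) ≠ 0) ↔ n.testBit j = true := by
  rw [PySem.Int.band_natCast, Nat.and_two_pow]
  cases h : n.testBit j <;> simp

-- B's (acc, bit) fold over the basis list tracks the Nat-level bit fold
lemma pair_invariant (q n : Nat) : ∀ (m j a : Nat),
    (((List.range' j m).map (fun k => (↑(natRun q (2 ^ k)) : Int))).foldl
      (fun (s : Int × Int) bv =>
        ((if PySem.Int.band (↑n) s.2 ≠ 0 then PySem.Int.bxor s.1 bv else s.1), s.2 <<< (1:Nat)))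
      ((↑a : Int), ((2^j : Nat) : Int))).1
    = ↑((List.range' j m).foldl
        (fun acc k => if n.testBit k then acc ^^^ natRun q (2 ^ k) else acc) a) := by
  intro m
  induction m with
  | zero => intro j a; simp
  | succ m ih =>
    intro j a
    rw [List.range'_succ, List.map_cons, List.foldl_cons, List.foldl_cons]
    simp only [pow_shift]
    by_cases hb : n.testBit j = true
    · rw [if_pos ((cond_bridge n j).mpr hb), if_pos hb, PySem.Int.bxor_natCast]
      exact ih (j+1) (a ^^^ natRun q (2 ^ j))
    · rw [if_neg (by rw [cond_bridge]; exact hb), if_neg hb]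
      exact ih (j+1) a

lemma basis_eq (p : Int) :
    ([1, 2, 4, 8, 16, 32, 64, 128] : List Int).foldl (fun bs b =>
      bs ++ [(PySem.List.pyRange 0 8 1).foldl (fun crc _ =>
        PySem.Int.bxor (PySem.Int.band (crc <<< (1:Nat)) 255)
          (if PySem.Int.band crc 128 ≠ 0 then PySem.Int.band p 255 else 0)) b]) []
    = (List.range' 0 8).map (fun k => (↑(natRun (pvQ p) (2 ^ k)) : Int)) := by
  rw [foldl_app]
  have h8 : List.range' 0 8 = [0, 1, 2, 3, 4, 5, 6, 7] := rfl
  rw [h8]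
  simp only [List.nil_append, List.map_cons, List.map_nil, List.cons.injEq, and_true]
  refine ⟨inner_bridge_B p 1, inner_bridge_B p 2, inner_bridge_B p 4, inner_bridge_B p 8,
    inner_bridge_B p 16, inner_bridge_B p 32, inner_bridge_B p 64, inner_bridge_B p 128⟩

lemma B_char (p : Int) :
    build_crc8_table_py_alt p = (List.range 256).map (fun n => ↑(natRun (pvQ p) n)) := by
  unfold build_crc8_table_py_alt
  simp only []
  rw [basis_eq]
  rw [PySem.List.pyRange_one, foldl_app]
  simp only [List.nil_append, List.map_map]
  have h256 : ((256:Int) - 0).toNat = 256 := rfl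
  rw [h256]
  apply List.map_congr_left
  intro n hn
  simp only [Function.comp_apply, zero_add]
  have hpi := pair_invariant (pvQ p) n 8 0 0
  have hcast0 : ((0:Nat) : Int) = (0:Int) := rfl
  have hcast1 : (((2:Nat)^0 : Nat) : Int) = (1:Int) := rfl
  rw [hcast0, hcast1] at hpi
  rw [hpi]
  congr 1
  rw [← List.range_eq_range']
  rw [fold_bits]
  congr 1
  have : n < 256 := List.mem_range.mp hn
  omega

-- ===== VERDICT (by name: the statement is the Claim_ definition above) =====
theorem build_crc8_table_py_spec : Claim_equal_build_crc8_table_py := by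
  intro poly _
  unfold Spec_build_crc8_table_py
  rw [A_char, B_char]
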